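-- pv_equiv track=rewrite | github.com/aklofas/kicad-happy-testharness | tools/spice_coverage.py | count_detections
-- ===== SOURCE A (Python) =====
-- DETECTOR_SPICE_MAP = {
--     "voltage_dividers": "voltage_divider",
--     "rc_filters": "rc_filter",
--     "lc_filters": "lc_filter",
--     "crystal_circuits": "crystal_circuit",
--     "protection_devices": "protection_device",
--     "power_regulators": "regulator_feedback",
--     "opamp_circuits": "opamp_circuit",
--     "current_sense_resistors": "current_sense",
--     "transistor_circuits": "transistor_circuit",
--     "feedback_networks": "feedback_network",
--     "decoupling_capacitors": "decoupling",
--     "rf_matching_networks": "rf_matching",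
--     "bridge_circuits": "bridge_circuit",
--     "snubber_circuits": "snubber_circuit",
--     "inrush_limiters": "inrush",
--     "bms_balance_circuits": "bms_balance",
--     "rf_chains": "rf_chain",
-- }
--
-- def count_detections(schematic_data):
--     """Count detections per detector type from a schematic output."""
--     # Group findings by detector
--     grouped = {}
--     for f in schematic_data.get("findings", []):
--         det = f.get("detector", "")
--         if det:
--             grouped.setdefault(det, []).append(f)
--     counts = {}
--     for det_key in DETECTOR_SPICE_MAP:
--         # Match with detect_ prefix
--         full_name = f"detect_{det_key}"
--         items = grouped.get(full_name, [])
--         counts[det_key] = len(items)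
--     return counts
-- ===== SOURCE B (Python) =====
-- DETECTOR_SPICE_MAP = {
--     "voltage_dividers": "voltage_divider",
--     "rc_filters": "rc_filter",
--     "lc_filters": "lc_filter",
--     "crystal_circuits": "crystal_circuit",
--     "protection_devices": "protection_device",
--     "power_regulators": "regulator_feedback",
--     "opamp_circuits": "opamp_circuit",
--     "current_sense_resistors": "current_sense",
--     "transistor_circuits": "transistor_circuit",
--     "feedback_networks": "feedback_network",
--     "decoupling_capacitors": "decoupling",
--     "rf_matching_networks": "rf_matching",
--     "bridge_circuits": "bridge_circuit",
--     "snubber_circuits": "snubber_circuit",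
--     "inrush_limiters": "inrush",
--     "bms_balance_circuits": "bms_balance",
--     "rf_chains": "rf_chain",
-- }
--
-- # Reverse lookup table: full detector name ("detect_<key>") -> det_key.
-- _REVERSE = {f"detect_{k}": k for k in DETECTOR_SPICE_MAP}
--
--
-- def count_detections(schematic_data):
--     """Count detections per detector type: one filtered pass over the findings,
--     incrementing counters through a precomputed reverse lookup table (no grouped
--     lists are ever built)."""
--     counts = {k: 0 for k in DETECTOR_SPICE_MAP}
--     for f in schematic_data.get("findings", []):
--         k = _REVERSE.get(f.get("detector"))
--         if k is not None:
--             counts[k] += 1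
--     return counts
-- ===== Notes on version B (the rewrite author's own statement) =====
-- stated objective: simpler
-- what changed: Instead of grouping findings into per-detector lists and then querying each group's length, B precomputes a reverse table detect_<key> -> key, initializes all counts to 0, and makes a single filtered pass over the findings incrementing counters directly; no grouped lists are built.
import Mathlib
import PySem

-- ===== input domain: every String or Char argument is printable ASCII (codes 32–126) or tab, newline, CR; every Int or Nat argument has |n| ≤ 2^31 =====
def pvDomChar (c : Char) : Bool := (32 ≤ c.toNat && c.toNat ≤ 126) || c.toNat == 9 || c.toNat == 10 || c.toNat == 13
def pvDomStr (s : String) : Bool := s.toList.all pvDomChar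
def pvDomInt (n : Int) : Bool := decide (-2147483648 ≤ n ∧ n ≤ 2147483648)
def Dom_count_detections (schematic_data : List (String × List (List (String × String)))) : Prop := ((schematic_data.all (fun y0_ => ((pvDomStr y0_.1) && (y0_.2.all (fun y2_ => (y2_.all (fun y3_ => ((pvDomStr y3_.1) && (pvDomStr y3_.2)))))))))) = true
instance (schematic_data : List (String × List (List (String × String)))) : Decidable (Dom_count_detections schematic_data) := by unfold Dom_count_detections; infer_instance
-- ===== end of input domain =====

-- B replaces A's group-findings-into-lists-then-measure-lengths pass by a precomputed
-- reverse table detect_<key> -> key and a single counter-incrementing pass (objective: simpler).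

-- ===== PORT A =====
def detectorSpiceMap : PySem.Dict String String := PySem.Dict.mk
  [("voltage_dividers", "voltage_divider"), ("rc_filters", "rc_filter"),
   ("lc_filters", "lc_filter"), ("crystal_circuits", "crystal_circuit"),
   ("protection_devices", "protection_device"), ("power_regulators", "regulator_feedback"),
   ("opamp_circuits", "opamp_circuit"), ("current_sense_resistors", "current_sense"),
   ("transistor_circuits", "transistor_circuit"), ("feedback_networks", "feedback_network"),
   ("decoupling_capacitors", "decoupling"), ("rf_matching_networks", "rf_matching"),
   ("bridge_circuits", "bridge_circuit"), ("snubber_circuits", "snubber_circuit"),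
   ("inrush_limiters", "inrush"), ("bms_balance_circuits", "bms_balance"),
   ("rf_chains", "rf_chain")]

def count_detections (schematic_data : List (String × List (List (String × String)))) : List (String × Int) :=
  let findings := (PySem.Dict.mk schematic_data).getD "findings" []
  -- grouped.setdefault(det, []).append(f)  ≡  grouped[det] = grouped.get(det, []) + [f]  = Dict.modify
  let grouped : PySem.Dict String (List (List (String × String))) :=
    findings.foldl (fun g f =>
      let det := (PySem.Dict.mk f).getD "detector" ""
      if det ≠ "" then g.modify det [] (fun items => items ++ [f]) else g)
      PySem.Dict.empty
  let counts : PySem.Dict String Int :=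
    (PySem.Dict.keys detectorSpiceMap).foldl (fun counts det_key =>
      counts.insert det_key (((grouped.getD ("detect_" ++ det_key) []).length : Int)))
      PySem.Dict.empty
  counts.items

-- ===== PORT B =====
-- _REVERSE = {f"detect_{k}": k for k in DETECTOR_SPICE_MAP}
def reverseDetectorMap : PySem.Dict String String :=
  (PySem.Dict.keys detectorSpiceMap).foldl (fun d k => d.insert ("detect_" ++ k) k) PySem.Dict.empty

def count_detections_alt (schematic_data : List (String × List (List (String × String)))) : List (String × Int) :=
  -- counts = {k: 0 for k in DETECTOR_SPICE_MAP}
  let counts0 : PySem.Dict String Int :=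
    (PySem.Dict.keys detectorSpiceMap).foldl (fun d k => d.insert k 0) PySem.Dict.empty
  let findings := (PySem.Dict.mk schematic_data).getD "findings" []
  -- k = _REVERSE.get(f.get("detector")); if k is not None: counts[k] += 1
  -- (counts[k] += 1 on a key always present = Dict.modify k 0 (· + 1))
  (findings.foldl (fun counts f =>
      match ((PySem.Dict.mk f).get? "detector").bind (fun det => reverseDetectorMap.get? det) with
      | some k => counts.modify k 0 (fun v => v + 1)
      | none => counts) counts0).items

-- ===== PRECONDITION & SPEC =====
def Spec_count_detections (schematic_data : List (String × List (List (String × String)))) (out : List (String × Int)) : Prop := out = count_detections_alt schematic_data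
instance (schematic_data : List (String × List (List (String × String)))) (out : List (String × Int)) : Decidable (Spec_count_detections schematic_data out) := by unfold Spec_count_detections; infer_instance

-- ===== CLAIM (what is proved, stated in full; the proofs are below) =====
def Claim_equal_count_detections : Prop := ∀ (schematic_data : List (String × List (List (String × String)))), Dom_count_detections schematic_data → Spec_count_detections schematic_data (count_detections schematic_data)

-- ===== LEMMAS AND PROOFS =====

-- the 17 det_keys, as a plain literal list
def spiceKeys : List String := PySem.Dict.keys detectorSpiceMap

-- A's grouping dict (proof-side name for the let-bound `grouped` of port A; defeq)
def groupedOf (schematic_data : List (String × List (List (String × String)))) :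
    PySem.Dict String (List (List (String × String))) :=
  ((PySem.Dict.mk schematic_data).getD "findings" []).foldl (fun g f =>
      let det := (PySem.Dict.mk f).getD "detector" ""
      if det ≠ "" then g.modify det [] (fun items => items ++ [f]) else g)
    PySem.Dict.empty

-- B's initial counter dict (proof-side name for the let-bound `counts0`; defeq)
def counts0B : PySem.Dict String Int :=
  (PySem.Dict.keys detectorSpiceMap).foldl (fun d k => d.insert k 0) PySem.Dict.empty

lemma spiceKeys_nodup : spiceKeys.Nodup := by decide

lemma detect_ne_empty (k : String) : "detect_" ++ k ≠ "" := by
  intro h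
  have := congrArg String.toList h
  simp [String.toList_append] at this

-- the reverse map is the association list pairing "detect_" ++ k with k, in key order
lemma reverseDetectorMap_eq :
    reverseDetectorMap = PySem.Dict.mk (spiceKeys.map (fun k => ("detect_" ++ k, k))) := by
  rfl

-- lookup in a "detect_"-prefixed reverse table
lemma get?_rev (ks : List String) (det k : String) :
    (PySem.Dict.mk (ks.map (fun a => ("detect_" ++ a, a)))).get? det = some k
      ↔ (k ∈ ks ∧ det = "detect_" ++ k) := by
  induction ks with
  | nil => simp [PySem.Dict.get?]
  | cons a t ih =>
    simp only [List.map_cons, PySem.Dict.get?_mk_cons]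
    by_cases h : ("detect_" ++ a : String) = det
    · rw [if_pos (by simp [h])]
      constructor
      · intro h'
        obtain rfl : a = k := Option.some.inj h'
        exact ⟨by simp, h.symm⟩
      · rintro ⟨hk, hdet⟩
        have h2 := congrArg String.toList (h.trans hdet)
        simp only [String.toList_append] at h2
        rw [String.toList_injective (List.append_cancel_left h2)]
    · rw [if_neg (by simp [h]), ih]
      constructor
      · rintro ⟨hk, hdet⟩
        exact ⟨List.mem_cons_of_mem _ hk, hdet⟩
      · rintro ⟨hk, hdet⟩
        rcases List.mem_cons.mp hk with rfl | hk'
        · exact absurd hdet.symm h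
        · exact ⟨hk', hdet⟩

lemma rev_lookup (det k : String) :
    reverseDetectorMap.get? det = some k ↔ (k ∈ spiceKeys ∧ det = "detect_" ++ k) := by
  rw [reverseDetectorMap_eq]; exact get?_rev spiceKeys det k

-- A's grouping pass, read back through getD at a nonempty key, counts matching findings
lemma lenA (l : List (List (String × String)))
    (g : PySem.Dict String (List (List (String × String)))) (s : String) (hs : s ≠ "") :
    ((l.foldl (fun g f =>
        let det := (PySem.Dict.mk f).getD "detector" ""
        if det ≠ "" then g.modify det [] (fun items => items ++ [f]) else g) g).getD s []).length
      = (g.getD s []).length + l.countP (fun f => (PySem.Dict.mk f).getD "detector" "" == s) := by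
  induction l generalizing g with
  | nil => simp
  | cons f t ih =>
    simp only [List.foldl_cons, List.countP_cons]
    by_cases h : (PySem.Dict.mk f).getD "detector" "" = ""
    · simp only [h, ne_eq, not_true_eq_false, if_false, ih]
      simp
      exact hs
    · have hi : (if (PySem.Dict.mk f).getD "detector" "" ≠ "" then
          g.modify ((PySem.Dict.mk f).getD "detector" "") [] (fun items => items ++ [f]) else g)
          = g.modify ((PySem.Dict.mk f).getD "detector" "") [] (fun items => items ++ [f]) := by
        simp [h]
      simp only [hi, ih]
      rw [PySem.Dict.getD_modify]
      by_cases hsd : s = (PySem.Dict.mk f).getD "detector" ""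
      · simp [hsd]
        omega
      · have hp : ((PySem.Dict.mk f).getD "detector" "" == s) = false := by
          exact beq_eq_false_iff_ne.mpr (Ne.symm hsd)
        simp [hsd, hp]

-- B's counting pass, read back through getD, counts reverse-matching findings
lemma cntB (l : List (List (String × String))) (d : PySem.Dict String Int) (k : String) :
    ((l.foldl (fun counts f =>
        match ((PySem.Dict.mk f).get? "detector").bind (fun det => reverseDetectorMap.get? det) with
        | some k => counts.modify k 0 (fun v => v + 1)
        | none => counts) d).getD k 0)
      = d.getD k 0 + (l.countP (fun f =>
          ((PySem.Dict.mk f).get? "detector").bind (fun det => reverseDetectorMap.get? det) == some k) : Int) := by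
  induction l generalizing d with
  | nil => simp
  | cons f t ih =>
    simp only [List.foldl_cons, List.countP_cons]
    cases hlk : ((PySem.Dict.mk f).get? "detector").bind (fun det => reverseDetectorMap.get? det) with
    | none =>
      simp only [ih]
      simp
    | some j =>
      simp only [ih, PySem.Dict.getD_modify]
      by_cases hkj : k = j
      · simp [hkj]
        omega
      · have hb : (some j == some k) = false := by
          simp only [beq_eq_false_iff_ne, ne_eq, Option.some.injEq]
          intro hc; exact hkj hc.symm
        simp [hkj, hb]

-- B's counting pass preserves the key list when every matched key is already present
lemma keysB (l : List (List (String × String))) (d : PySem.Dict String Int)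
    (hd : spiceKeys ⊆ d.keys) :
    (l.foldl (fun counts f =>
        match ((PySem.Dict.mk f).get? "detector").bind (fun det => reverseDetectorMap.get? det) with
        | some k => counts.modify k 0 (fun v => v + 1)
        | none => counts) d).keys = d.keys := by
  induction l generalizing d with
  | nil => rfl
  | cons f t ih =>
    simp only [List.foldl_cons]
    cases hlk : ((PySem.Dict.mk f).get? "detector").bind (fun det => reverseDetectorMap.get? det) with
    | none => exact ih d hd
    | some j =>
      have hj : j ∈ spiceKeys := by
        cases hg : (PySem.Dict.mk f).get? "detector" with
        | none => simp [hg] at hlk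
        | some det =>
          simp only [hg, Option.bind_some] at hlk
          exact ((rev_lookup det j).mp hlk).1
      have hcon : d.contains j = true := (PySem.Dict.contains_iff_mem_keys ..).mpr (hd hj)
      have hkm : (d.modify j 0 (fun v => v + 1)).keys = d.keys := by
        rw [PySem.Dict.keys_modify]
        exact PySem.Dict.keys_insert_of_contains _ _ hcon
      rw [ih _ (by rw [hkm]; exact hd), hkm]

lemma counts0B_items : counts0B.items = spiceKeys.map (fun k => (k, (0 : Int))) := by
  have h1 := PySem.Dict.items_foldl_insert_fresh (l := spiceKeys) (k := fun a : String => a)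
      (v := fun _ => (0 : Int)) (d := PySem.Dict.empty)
      (fun a _ => PySem.Dict.contains_empty a) (by simpa using spiceKeys_nodup)
  have h2 : (List.foldl (fun d (a : String) => d.insert a (0 : Int)) PySem.Dict.empty spiceKeys).items
      = spiceKeys.map (fun k => (k, (0 : Int))) := by simpa using h1
  exact h2

lemma counts0B_keys : counts0B.keys = spiceKeys := by
  have : counts0B.keys = counts0B.items.map Prod.fst := rfl
  rw [this, counts0B_items, List.map_map]
  have h2 : (Prod.fst ∘ fun k : String => (k, (0 : Int))) = id := rfl
  rw [h2, List.map_id]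

lemma counts0B_getD {k : String} (hk : k ∈ spiceKeys) : counts0B.getD k 0 = 0 := by
  apply PySem.Dict.getD_of_mem_items
  · rw [counts0B_items]
    exact List.mem_map.mpr ⟨k, hk, rfl⟩
  · rw [counts0B_keys]
    exact spiceKeys_nodup

-- A unfolded: key order with grouped lengths, then counted via lenA
lemma countA_eq (schematic_data : List (String × List (List (String × String)))) :
    count_detections schematic_data
      = spiceKeys.map (fun k => (k,
          ((((PySem.Dict.mk schematic_data).getD "findings" []).countP
            (fun f => (PySem.Dict.mk f).getD "detector" "" == "detect_" ++ k) : Nat) : Int))) := by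
  have h1 := PySem.Dict.items_foldl_insert_fresh (l := spiceKeys) (k := fun a : String => a)
      (v := fun k => ((((groupedOf schematic_data).getD ("detect_" ++ k) []).length : Nat) : Int))
      (d := PySem.Dict.empty)
      (fun a _ => PySem.Dict.contains_empty a) (by simpa using spiceKeys_nodup)
  have h2 : (List.foldl (fun counts det_key =>
        counts.insert det_key ((((groupedOf schematic_data).getD ("detect_" ++ det_key) []).length : Nat) : Int))
        PySem.Dict.empty spiceKeys).items
      = spiceKeys.map (fun k => (k, ((((groupedOf schematic_data).getD ("detect_" ++ k) []).length : Nat) : Int))) := by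
    simpa using h1
  have h3 : count_detections schematic_data
      = spiceKeys.map (fun k => (k, ((((groupedOf schematic_data).getD ("detect_" ++ k) []).length : Nat) : Int))) := h2
  rw [h3]
  apply List.map_congr_left
  intro k _
  have h4 : ((groupedOf schematic_data).getD ("detect_" ++ k) []).length
      = ((PySem.Dict.empty : PySem.Dict String (List (List (String × String)))).getD ("detect_" ++ k) []).length
        + ((PySem.Dict.mk schematic_data).getD "findings" []).countP
            (fun f => (PySem.Dict.mk f).getD "detector" "" == "detect_" ++ k) :=
    lenA _ _ _ (detect_ne_empty k)
  simp only [PySem.Dict.getD_empty, List.length_nil, Nat.zero_add] at h4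
  rw [h4]

-- B unfolded: key order with the counter values, then counted via cntB
lemma countB_eq (schematic_data : List (String × List (List (String × String)))) :
    count_detections_alt schematic_data
      = spiceKeys.map (fun k => (k,
          ((((PySem.Dict.mk schematic_data).getD "findings" []).countP
            (fun f => ((PySem.Dict.mk f).get? "detector").bind (fun det => reverseDetectorMap.get? det)
                == some k) : Nat) : Int))) := by
  have hsub : spiceKeys ⊆ counts0B.keys := by
    rw [counts0B_keys]
    exact List.Subset.refl _
  have hkeys : (((PySem.Dict.mk schematic_data).getD "findings" []).foldl (fun counts f =>
        match ((PySem.Dict.mk f).get? "detector").bind (fun det => reverseDetectorMap.get? det) with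
        | some k => counts.modify k 0 (fun v => v + 1)
        | none => counts) counts0B).keys = spiceKeys := by
    rw [keysB _ _ hsub, counts0B_keys]
  have hnd : (((PySem.Dict.mk schematic_data).getD "findings" []).foldl (fun counts f =>
        match ((PySem.Dict.mk f).get? "detector").bind (fun det => reverseDetectorMap.get? det) with
        | some k => counts.modify k 0 (fun v => v + 1)
        | none => counts) counts0B).keys.Nodup := by
    rw [hkeys]; exact spiceKeys_nodup
  have h3 : count_detections_alt schematic_data
      = (((PySem.Dict.mk schematic_data).getD "findings" []).foldl (fun counts f =>
          match ((PySem.Dict.mk f).get? "detector").bind (fun det => reverseDetectorMap.get? det) with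
          | some k => counts.modify k 0 (fun v => v + 1)
          | none => counts) counts0B).items := rfl
  rw [h3, PySem.Dict.items_eq_map_keys _ hnd 0, hkeys]
  apply List.map_congr_left
  intro k hk
  rw [cntB, counts0B_getD hk, zero_add]

-- the two per-finding predicates agree for every det_key
lemma pred_eq (k : String) (hk : k ∈ spiceKeys) (f : List (String × String)) :
    ((PySem.Dict.mk f).getD "detector" "" == "detect_" ++ k)
      = (((PySem.Dict.mk f).get? "detector").bind (fun det => reverseDetectorMap.get? det) == some k) := by
  cases hg : (PySem.Dict.mk f).get? "detector" with
  | none =>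
    rw [PySem.Dict.getD_eq_get?_getD, hg]
    simp [Ne.symm (detect_ne_empty k)]
  | some det =>
    rw [PySem.Dict.getD_eq_get?_getD, hg]
    simp only [Option.getD_some, Option.bind_some]
    by_cases hd : det = "detect_" ++ k
    · subst hd
      have hr : reverseDetectorMap.get? ("detect_" ++ k) = some k :=
        (rev_lookup _ k).mpr ⟨hk, rfl⟩
      simp [hr]
    · have hr : reverseDetectorMap.get? det ≠ some k := fun hc => hd ((rev_lookup det k).mp hc).2
      simp [hd, hr]

-- ===== VERDICT (by name: the statement is the Claim_ definition above) =====
theorem count_detections_spec : Claim_equal_count_detections := by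
  intro sd _
  unfold Spec_count_detections
  rw [countA_eq, countB_eq]
  apply List.map_congr_left
  intro k hk
  rw [List.countP_congr]
  intro f _
  rw [pred_eq k hk f]
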